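-- pv_equiv track=rewrite | github.com/Rahul2325/Battleships | battleship.py | isHorizontal
-- ===== SOURCE A (Python) =====
-- def isHorizontal(ship):
--     for i in range(0,2,1):
--         if (ship[i][0]!=ship[i+1][0]):
--             return False
--     col=[]
--     for i in range(0,3,1):
--         col.append(ship[i][1])
--     col.sort()
--     for i in range(0,2,1):
--         if (col[i]+1!=col[i+1]):
--             return False
--     return True
-- ===== SOURCE B (Python) =====
-- def isHorizontal(ship):
--     if ship[0][0] != ship[1][0] or ship[1][0] != ship[2][0]:
--         return False
--     cols = [row[1] for row in ship[:3]]
--     m = min(cols)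
--     return (m + 1) in cols and (m + 2) in cols
-- ===== Notes on version B (the rewrite author's own statement) =====
-- stated objective: simpler
-- what changed: Drops the unrolled row loop, the append-then-sort of the columns and the adjacent-difference loop: B rejects unequal rows with one guard, collects the columns by a comprehension over ship[:3], and tests consecutiveness as 'm+1 in cols and m+2 in cols' for m = min(cols) (three values with minimum m containing m+1 and m+2 are exactly three consecutive integers).
import Mathlib
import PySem

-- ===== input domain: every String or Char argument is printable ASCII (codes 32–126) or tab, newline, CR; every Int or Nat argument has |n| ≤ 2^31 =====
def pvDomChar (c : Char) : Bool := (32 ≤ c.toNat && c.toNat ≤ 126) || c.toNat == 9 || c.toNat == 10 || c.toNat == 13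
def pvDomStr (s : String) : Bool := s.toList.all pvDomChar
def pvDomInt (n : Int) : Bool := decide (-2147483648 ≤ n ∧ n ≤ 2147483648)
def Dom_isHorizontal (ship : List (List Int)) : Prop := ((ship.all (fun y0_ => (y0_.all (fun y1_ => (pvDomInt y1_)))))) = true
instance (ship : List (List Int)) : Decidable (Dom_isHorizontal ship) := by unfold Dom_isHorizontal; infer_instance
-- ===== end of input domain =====

-- B replaces A's sort + adjacent-difference loop by a single row guard and a
-- min-plus-membership consecutiveness test on the columns; same return value wherever A returns.


-- ===== PORT A =====
-- ship[i][j] as an Option (none = IndexError); used by A's port and by Pre_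
def pvGet (ship : List (List Int)) (i j : Int) : Option Int :=
  match PySem.List.pyGet? ship i with
  | none => none
  | some row => PySem.List.pyGet? row j

-- literal port of A; the two fixed-bound range(0,2)/range(0,3) loops are unrolled
-- (each iteration transcribed in order); .getD 0 is only reached outside Pre_.
def isHorizontal (ship : List (List Int)) : Bool :=
  -- for i in range(0,2,1): if ship[i][0]!=ship[i+1][0]: return False
  if (pvGet ship 0 0).getD 0 ≠ (pvGet ship 1 0).getD 0 then false
  else if (pvGet ship 1 0).getD 0 ≠ (pvGet ship 2 0).getD 0 then false
  else
    -- col = [ship[0][1], ship[1][1], ship[2][1]]; col.sort()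
    let col : List Int := [(pvGet ship 0 1).getD 0, (pvGet ship 1 1).getD 0, (pvGet ship 2 1).getD 0]
    let s := PySem.List.sorted col (fun v => v) false
    -- for i in range(0,2,1): if col[i]+1 != col[i+1]: return False
    if (PySem.List.pyGet? s 0).getD 0 + 1 ≠ (PySem.List.pyGet? s 1).getD 0 then false
    else if (PySem.List.pyGet? s 1).getD 0 + 1 ≠ (PySem.List.pyGet? s 2).getD 0 then false
    else true

-- ===== PORT B =====
-- literal port of Source B: one row guard, columns by comprehension over ship[:3],
-- then 'm+1 in cols and m+2 in cols' with m = min(cols).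
-- pvCell ship i j = ship[i][j] with 0 defaults (only reached outside Pre_).
def pvCell (ship : List (List Int)) (i j : Int) : Int :=
  (PySem.List.pyGet? ((PySem.List.pyGet? ship i).getD []) j).getD 0

def isHorizontal_alt (ship : List (List Int)) : Bool :=
  if pvCell ship 0 0 ≠ pvCell ship 1 0 ∨ pvCell ship 1 0 ≠ pvCell ship 2 0 then false
  else
    let cols : List Int :=
      (PySem.List.slice ship (some 0) (some 3)).map (fun row => (PySem.List.pyGet? row 1).getD 0)
    let m : Int := (PySem.List.min? cols (fun v => v)).getD 0
    cols.contains (m + 1) && cols.contains (m + 2)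

-- ===== PRECONDITION & SPEC =====
-- Pre_ excludes exactly the inputs where the Python A raises IndexError (a missing row or
-- a too-short row among the cells A actually reads before returning).
def Pre_isHorizontal (ship : List (List Int)) : Prop :=
  (pvGet ship 0 0).isSome ∧ (pvGet ship 1 0).isSome ∧
  (pvGet ship 0 0 ≠ pvGet ship 1 0 ∨
    ((pvGet ship 2 0).isSome ∧
      (pvGet ship 1 0 ≠ pvGet ship 2 0 ∨
        ((pvGet ship 0 1).isSome ∧ (pvGet ship 1 1).isSome ∧ (pvGet ship 2 1).isSome))))
instance (ship : List (List Int)) : Decidable (Pre_isHorizontal ship) := by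
  unfold Pre_isHorizontal; infer_instance
def pvWitness_isHorizontal : List (List Int) := [[1, 4], [1, 6], [1, 5]]

def Spec_isHorizontal (ship : List (List Int)) (out : Bool) : Prop := out = isHorizontal_alt ship
instance (ship : List (List Int)) (out : Bool) : Decidable (Spec_isHorizontal ship out) := by
  unfold Spec_isHorizontal; infer_instance

-- ===== CLAIM (what is proved, stated in full; the proofs are below) =====
def Claim_equal_isHorizontal : Prop := ∀ (ship : List (List Int)), Dom_isHorizontal ship → Pre_isHorizontal ship → Spec_isHorizontal ship (isHorizontal ship)

-- ===== LEMMAS AND PROOFS =====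

-- sorted [x,y,z] named by exhibiting an ordered rearrangement
theorem sort3 (x y z a b c : Int) (hp : List.Perm [a, b, c] [x, y, z])
    (h1 : a ≤ b) (h2 : b ≤ c) :
    PySem.List.sorted [x, y, z] (fun v => v) false = [a, b, c] :=
  PySem.List.sorted_id_eq_of_perm_of_pairwise _ _ hp
    (List.Pairwise.cons
      (fun t ht => by
        rcases List.mem_cons.mp ht with rfl | ht
        · exact h1
        rcases List.mem_cons.mp ht with rfl | ht
        · exact le_trans h1 h2
        · cases ht)
      (List.Pairwise.cons
        (fun t ht => by
          rcases List.mem_cons.mp ht with rfl | ht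
          · exact h2
          · cases ht)
        (List.pairwise_singleton _ _)))

theorem perm_213 (x y z : Int) : List.Perm [y, x, z] [x, y, z] := List.Perm.swap x y [z]
theorem perm_132 (x y z : Int) : List.Perm [x, z, y] [x, y, z] :=
  List.Perm.cons x (List.Perm.swap y z [])
theorem perm_312 (x y z : Int) : List.Perm [z, x, y] [x, y, z] :=
  (List.Perm.swap x z [y]).trans (perm_132 x y z)
theorem perm_231 (x y z : Int) : List.Perm [y, z, x] [x, y, z] :=
  (List.Perm.cons y (List.Perm.swap x z [])).trans (perm_213 x y z)
theorem perm_321 (x y z : Int) : List.Perm [z, y, x] [x, y, z] :=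
  (List.Perm.swap y z [x]).trans (perm_231 x y z)

theorem pyGet3_0 (a b c : Int) : PySem.List.pyGet? [a, b, c] 0 = some a := by
  rw [show (0 : Int) = ((0 : Nat) : Int) from rfl, PySem.List.pyGet?_natCast]; rfl
theorem pyGet3_1 (a b c : Int) : PySem.List.pyGet? [a, b, c] 1 = some b := by
  rw [show (1 : Int) = ((1 : Nat) : Int) from rfl, PySem.List.pyGet?_natCast]; rfl
theorem pyGet3_2 (a b c : Int) : PySem.List.pyGet? [a, b, c] 2 = some c := by
  rw [show (2 : Int) = ((2 : Nat) : Int) from rfl, PySem.List.pyGet?_natCast]; rfl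

-- the heart: on three arbitrary column values, A's sorted-consecutive test equals
-- B's min-plus-membership test
theorem core (x y z : Int) :
    (let s := PySem.List.sorted [x, y, z] (fun v => v) false
     if (PySem.List.pyGet? s 0).getD 0 + 1 ≠ (PySem.List.pyGet? s 1).getD 0 then false
     else if (PySem.List.pyGet? s 1).getD 0 + 1 ≠ (PySem.List.pyGet? s 2).getD 0 then false
     else true)
    = (let m : Int := (PySem.List.min? [x, y, z] (fun v => v)).getD 0
       [x, y, z].contains (m + 1) && [x, y, z].contains (m + 2)) := by
  have hsorted : ∃ a b c : Int, PySem.List.sorted [x, y, z] (fun v => v) false = [a, b, c] ∧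
      a ≤ b ∧ b ≤ c ∧ min (min x y) z = a ∧
      (∀ v, v ∈ ([x, y, z] : List Int) ↔ v = a ∨ v = b ∨ v = c) := by
    rcases le_total x y with hxy | hxy
    · rcases le_total y z with hyz | hyz
      · exact ⟨x, y, z, sort3 x y z x y z (List.Perm.refl _) hxy hyz, hxy, hyz, by omega,
          fun v => by simp [List.mem_cons]⟩
      · rcases le_total x z with hxz | hxz
        · exact ⟨x, z, y, sort3 x y z x z y (perm_132 x y z) hxz hyz, hxz, hyz, by omega,
            fun v => by simp [List.mem_cons]; tauto⟩
        · exact ⟨z, x, y, sort3 x y z z x y (perm_312 x y z) hxz hxy, hxz, hxy, by omega,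
            fun v => by simp [List.mem_cons]; tauto⟩
    · rcases le_total x z with hxz | hxz
      · exact ⟨y, x, z, sort3 x y z y x z (perm_213 x y z) hxy hxz, hxy, hxz, by omega,
          fun v => by simp [List.mem_cons]; tauto⟩
      · rcases le_total y z with hyz | hyz
        · exact ⟨y, z, x, sort3 x y z y z x (perm_231 x y z) hyz hxz, hyz, hxz, by omega,
            fun v => by simp [List.mem_cons]; tauto⟩
        · exact ⟨z, y, x, sort3 x y z z y x (perm_321 x y z) hyz hxy, hyz, hxy, by omega,
            fun v => by simp [List.mem_cons]; tauto⟩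
  obtain ⟨a, b, c, hs, hab, hbc, hmin, hmem⟩ := hsorted
  rw [hs, PySem.List.min?_id_cons]
  simp only [pyGet3_0, pyGet3_1, pyGet3_2, Option.getD_some, List.foldl]
  rw [hmin]
  by_cases h12 : a + 1 = b ∧ b + 1 = c
  · obtain ⟨h1, h2⟩ := h12
    have m1 : (a + 1) ∈ ([x, y, z] : List Int) := (hmem _).mpr (by omega)
    have m2 : (a + 2) ∈ ([x, y, z] : List Int) := (hmem _).mpr (by omega)
    rw [List.contains_iff_mem.mpr m1, List.contains_iff_mem.mpr m2]
    simp [h1, h2]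
  · have hrhs : ([x, y, z].contains (a + 1) && [x, y, z].contains (a + 2)) = false := by
      rcases hc1 : [x, y, z].contains (a + 1) with _ | _
      · simp
      rcases hc2 : [x, y, z].contains (a + 2) with _ | _
      · simp
      exfalso
      have d1 := (hmem _).mp (List.contains_iff_mem.mp hc1)
      have d2 := (hmem _).mp (List.contains_iff_mem.mp hc2)
      omega
    rw [hrhs]
    split_ifs with g1 g2
    · rfl
    · rfl
    · exact absurd ⟨not_not.mp (by simpa using g1), not_not.mp (by simpa using g2)⟩ h12

theorem cell_eq (ship : List (List Int)) (i j : Int) :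
    pvCell ship i j = (pvGet ship i j).getD 0 := by
  unfold pvCell pvGet
  cases h : PySem.List.pyGet? ship i with
  | none => simp [PySem.List.pyGet?]
  | some row => simp

theorem pyGetCons_0 {α : Type} (a : α) (l : List α) : PySem.List.pyGet? (a :: l) 0 = some a := by
  rw [show (0 : Int) = ((0 : Nat) : Int) from rfl, PySem.List.pyGet?_natCast]; rfl
theorem pyGetCons_1 {α : Type} (a b : α) (l : List α) :
    PySem.List.pyGet? (a :: b :: l) 1 = some b := by
  rw [show (1 : Int) = ((1 : Nat) : Int) from rfl, PySem.List.pyGet?_natCast]; rfl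
theorem pyGetCons_2 {α : Type} (a b c : α) (l : List α) :
    PySem.List.pyGet? (a :: b :: c :: l) 2 = some c := by
  rw [show (2 : Int) = ((2 : Nat) : Int) from rfl, PySem.List.pyGet?_natCast]; rfl

-- ===== VERDICT (by name: the statement is the Claim_ definition above) =====
theorem isHorizontal_spec : Claim_equal_isHorizontal := by
  intro ship _ hpre
  unfold Spec_isHorizontal isHorizontal isHorizontal_alt
  simp only [cell_eq]
  obtain ⟨s00, s10, hrest⟩ := hpre
  by_cases h1 : (pvGet ship 0 0).getD 0 = (pvGet ship 1 0).getD 0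
  · have hopt1 : pvGet ship 0 0 = pvGet ship 1 0 := by
      cases e0 : pvGet ship 0 0 <;> cases e1 : pvGet ship 1 0 <;>
        simp_all
    rcases hrest with hne | ⟨s20, hrest⟩
    · exact absurd hopt1 hne
    by_cases h2 : (pvGet ship 1 0).getD 0 = (pvGet ship 2 0).getD 0
    · -- all rows equal: both take the else branch; reduce to the core lemma
      have hlen : 2 < ship.length := by
        have : PySem.List.pyGet? ship 2 ≠ none := by
          intro e; unfold pvGet at s20; rw [e] at s20; simp at s20
        have hin := not_not.mp (fun hni => this ((PySem.List.pyGet?_eq_none_iff ship 2).mpr hni))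
        unfold PySem.Raise.InRange at hin; omega
      rcases ship with _ | ⟨l0, _ | ⟨l1, _ | ⟨l2, t⟩⟩⟩ <;> simp at hlen
      have hsl : PySem.List.slice (l0 :: l1 :: l2 :: t) (some 0) (some 3) = [l0, l1, l2] := by
        rw [PySem.List.slice_zero_start, show (3 : Int) = ((3 : Nat) : Int) from rfl,
          PySem.List.slice_to_natCast]
        rfl
      have hOr : ¬((pvGet (l0 :: l1 :: l2 :: t) 0 0).getD 0 ≠ (pvGet (l0 :: l1 :: l2 :: t) 1 0).getD 0 ∨
          (pvGet (l0 :: l1 :: l2 :: t) 1 0).getD 0 ≠ (pvGet (l0 :: l1 :: l2 :: t) 2 0).getD 0) := by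
        rw [not_or, not_not, not_not]; exact ⟨h1, h2⟩
      rw [if_neg hOr, if_neg (not_not.mpr h1), if_neg (not_not.mpr h2), hsl]
      simp only [pvGet, pyGetCons_0, pyGetCons_1, pyGetCons_2, List.map]
      exact core _ _ _
    · -- second row comparison fails: both return false
      rw [if_neg (not_not.mpr h1), if_pos h2, if_pos (Or.inr h2)]
  · -- first row comparison fails: both return false
    rw [if_pos h1, if_pos (Or.inl h1)]
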